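-- pv_equiv track=rewrite | github.com/busyweaver/temporal_nest | temporal_nest_lib.py | dist_colours
-- ===== SOURCE A (Python) =====
-- def dist_colours(col):
--     res = dict()
--     for e in col.keys():
--         if col[e] not in res:
--             res[col[e]] = {e}
--         else:
--             res[col[e]].add(e)
--     return res
-- ===== SOURCE B (Python) =====
-- def dist_colours(col):
--     # Idiomatic comprehension: one pass to collect the distinct colours in
--     # first-appearance order, then build each colour's key-set by rescanning col.
--     return {v: {k for k in col if col[k] == v} for v in dict.fromkeys(col.values())}
-- ===== Notes on version B (the rewrite author's own statement) =====
-- stated objective: idiomatic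
-- what changed: A inverts the dict in a single pass that mutates an accumulator (insert-or-add per key); B is a dict comprehension over the distinct colour values (dict.fromkeys(col.values())) with an inner rescan of the keys per value.
import Mathlib
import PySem

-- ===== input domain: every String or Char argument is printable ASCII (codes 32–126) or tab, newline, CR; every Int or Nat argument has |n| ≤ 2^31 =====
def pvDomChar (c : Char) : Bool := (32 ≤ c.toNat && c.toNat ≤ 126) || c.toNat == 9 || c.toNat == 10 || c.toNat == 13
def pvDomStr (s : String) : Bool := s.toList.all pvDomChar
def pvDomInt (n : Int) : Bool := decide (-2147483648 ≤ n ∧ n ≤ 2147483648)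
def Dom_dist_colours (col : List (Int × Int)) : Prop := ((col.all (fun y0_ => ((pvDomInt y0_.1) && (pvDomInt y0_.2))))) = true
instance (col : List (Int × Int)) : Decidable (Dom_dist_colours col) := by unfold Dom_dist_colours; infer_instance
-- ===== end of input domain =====

-- B groups by a dict comprehension over the distinct colours instead of A's single
-- mutating inverting pass; equal output for every dict input (idiomatic objective).

-- ===== PORT A =====
def dist_colours (col : List (Int × Int)) : List (Int × List Int) :=
  let d := PySem.Dict.mk col
  let res := (PySem.Dict.keys d).foldl
    (fun res e =>
      match PySem.Dict.get? d e with
      | some c =>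
          if res.contains c = false then
            res.insert c (PySem.Set.ofList [e])
          else
            res.modify c [] (fun s => PySem.Set.add s e)
      | none => res)   -- unreachable: e ranges over d's keys
    PySem.Dict.empty
  res.items

-- ===== PORT B =====
def dist_colours_alt (col : List (Int × Int)) : List (Int × List Int) :=
  let d := PySem.Dict.mk col
  (PySem.List.dedup (PySem.Dict.values d)).map
    (fun v => (v, PySem.Set.ofList ((PySem.Dict.keys d).filter
        (fun k => PySem.Dict.get? d k == some v))))

-- ===== PRECONDITION & SPEC =====
-- The assoc-list encoding of A's dict argument is faithful only when the keys are
-- pairwise distinct (a Python dict cannot carry duplicate keys), so Pre_ requires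
-- exactly that; it excludes no input the Python A actually accepts.
def Pre_dist_colours (col : List (Int × Int)) : Prop := (col.map Prod.fst).Nodup
instance (col : List (Int × Int)) : Decidable (Pre_dist_colours col) := by unfold Pre_dist_colours; infer_instance
def pvWitness_dist_colours : (List (Int × Int)) := [(1, 2), (3, 2), (4, 5)]
def Spec_dist_colours (col : List (Int × Int)) (out : List (Int × List Int)) : Prop := out = dist_colours_alt col
instance (col : List (Int × Int)) (out : List (Int × List Int)) : Decidable (Spec_dist_colours col out) := by unfold Spec_dist_colours; infer_instance

-- ===== CLAIM (what is proved, stated in full; the proofs are below) =====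
def Claim_equal_dist_colours : Prop := ∀ (col : List (Int × Int)), Dom_dist_colours col → Pre_dist_colours col → Spec_dist_colours col (dist_colours col)

-- ===== LEMMAS AND PROOFS =====

-- The common grouping step both ports reduce to: res[p.2] = res.get(p.2, ∅) ∪ {p.1}.
def pvStep (res : PySem.Dict Int (PySem.Set Int)) (p : Int × Int) : PySem.Dict Int (PySem.Set Int) :=
  res.insert p.2 (PySem.Set.add (res.getD p.2 []) p.1)

lemma pv_core (col : List (Int × Int)) (h : (col.map Prod.fst).Nodup) :
    (col.foldl pvStep PySem.Dict.empty).items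
      = (PySem.List.dedup (col.map Prod.snd)).map
          (fun v => (v, (col.filter (fun p => p.2 == v)).map Prod.fst)) := by
  induction col using List.reverseRecOn with
  | nil => rfl
  | append_singleton l p ih =>
    have hmap : (l.map Prod.fst).Nodup ∧ p.1 ∉ l.map Prod.fst := by
      rw [List.map_append] at h
      have h' := List.nodup_append.mp h
      exact ⟨h'.1, fun hin => h'.2.2 p.1 hin p.1 (by simp) rfl⟩
    have ihh := ih hmap.1
    set D := l.foldl pvStep PySem.Dict.empty with hD
    have hkeys : D.keys = PySem.List.dedup (l.map Prod.snd) := by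
      show D.items.map Prod.fst = _
      rw [ihh, List.map_map]
      have hid : (Prod.fst ∘ fun v : Int =>
          (v, (l.filter (fun p => p.2 == v)).map Prod.fst)) = fun v : Int => v := rfl
      rw [hid, List.map_id']
    have hnodupk : D.keys.Nodup := by rw [hkeys]; exact PySem.List.nodup_dedup _
    have hgetD : ∀ v ∈ PySem.List.dedup (l.map Prod.snd),
        D.getD v [] = (l.filter (fun p => p.2 == v)).map Prod.fst := by
      intro v hv
      apply PySem.Dict.getD_of_mem_items _ _ hnodupk
      rw [ihh]
      exact List.mem_map_of_mem hv
    rw [List.foldl_append, List.foldl_cons, List.foldl_nil]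
    by_cases hmem : p.2 ∈ l.map Prod.snd
    · -- existing colour: the entry is rewritten in place
      have hvded : p.2 ∈ PySem.List.dedup (l.map Prod.snd) := by
        simpa [PySem.List.mem_dedup] using hmem
      have hcont : D.contains p.2 = true := by
        rw [PySem.Dict.contains_eq_decide_mem_keys, hkeys]; simpa using hvded
      have hded2 : PySem.List.dedup ((l ++ [p]).map Prod.snd)
          = PySem.List.dedup (l.map Prod.snd) := by
        simp only [List.map_append, List.map_cons, List.map_nil,
          PySem.List.dedup_eq_ofList, PySem.Set.ofList_append_singleton]
        exact PySem.Set.add_of_mem (by simpa [PySem.Set.mem_ofList] using hmem)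
      show (D.insert p.2 (PySem.Set.add (D.getD p.2 []) p.1)).items = _
      rw [PySem.Dict.items_insert_of_contains _ _ hcont, ihh, hded2, List.map_map]
      apply List.map_congr_left
      intro v hv
      by_cases hvp : v = p.2
      · have hnotin : p.1 ∉ (l.filter (fun q => q.2 == p.2)).map Prod.fst := by
          intro hin
          obtain ⟨q, hq, hq1⟩ := List.mem_map.mp hin
          exact hmap.2 (hq1 ▸ List.mem_map_of_mem (List.mem_of_mem_filter hq))
        subst hvp
        simp only [Function.comp_apply, beq_self_eq_true, if_true]
        rw [hgetD _ hv, PySem.Set.add_of_not_mem hnotin]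
        simp [List.filter_append]
      · have hb : (v == p.2) = false := by simpa using hvp
        simp only [Function.comp_apply, hb, Bool.false_eq_true, if_false]
        have hb2 : (p.2 == v) = false := by simpa using Ne.symm hvp
        simp [List.filter_append, hb2]
    · -- fresh colour: a new entry is appended
      have hncont : D.contains p.2 = false := by
        rw [PySem.Dict.contains_eq_decide_mem_keys, hkeys]
        simpa [PySem.List.mem_dedup] using hmem
      have hded2 : PySem.List.dedup ((l ++ [p]).map Prod.snd)
          = PySem.List.dedup (l.map Prod.snd) ++ [p.2] := by
        simp only [List.map_append, List.map_cons, List.map_nil,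
          PySem.List.dedup_eq_ofList, PySem.Set.ofList_append_singleton]
        exact PySem.Set.add_of_not_mem (by simpa [PySem.Set.mem_ofList] using hmem)
      show (D.insert p.2 (PySem.Set.add (D.getD p.2 []) p.1)).items = _
      rw [PySem.Dict.items_insert_of_not_contains _ _ hncont,
        PySem.Dict.getD_of_not_contains _ _ hncont, ihh, hded2, List.map_append]
      congr 1
      · apply List.map_congr_left
        intro v hv
        have hvne : (p.2 == v) = false := by
          have : p.2 ≠ v := fun e =>
            hmem (e ▸ (by simpa [PySem.List.mem_dedup] using hv))
          simpa using this
        simp [List.filter_append, hvne]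
      · have hfl : l.filter (fun q => q.2 == p.2) = [] := by
          rw [List.filter_eq_nil_iff]
          intro q hq hq2
          have : q.2 = p.2 := by simpa using hq2
          exact hmem (this ▸ List.mem_map_of_mem hq)
        simp [List.filter_append, hfl, PySem.Set.add]

lemma pv_A (col : List (Int × Int)) (h : (col.map Prod.fst).Nodup) :
    dist_colours col = (col.foldl pvStep PySem.Dict.empty).items := by
  unfold dist_colours
  dsimp only
  congr 1
  rw [show (PySem.Dict.mk col).keys = col.map Prod.fst from rfl, List.foldl_map]
  apply PySem.List.foldl_congr_mem
  intro acc p hp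
  have hg : PySem.Dict.get? (PySem.Dict.mk col) p.1 = some p.2 :=
    PySem.Dict.get?_of_mem_items _ (by exact hp) h
  rw [hg]
  by_cases hc : acc.contains p.2 = false
  · simp only [hc, if_true, pvStep]
    rw [PySem.Dict.getD_of_not_contains _ _ hc]
    rfl
  · simp [pvStep, PySem.Dict.modify]
    intro hcc; exact absurd hcc hc

lemma pv_B (col : List (Int × Int)) (h : (col.map Prod.fst).Nodup) :
    dist_colours_alt col
      = (PySem.List.dedup (col.map Prod.snd)).map
          (fun v => (v, (col.filter (fun p => p.2 == v)).map Prod.fst)) := by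
  unfold dist_colours_alt
  dsimp only
  rw [show PySem.Dict.values (PySem.Dict.mk col) = col.map Prod.snd from rfl]
  apply List.map_congr_left
  intro v _
  congr 1
  rw [show (PySem.Dict.mk col).keys = col.map Prod.fst from rfl, List.filter_map]
  have hcongr : col.filter ((fun k => PySem.Dict.get? (PySem.Dict.mk col) k == some v) ∘ Prod.fst)
      = col.filter (fun p => p.2 == v) := by
    apply List.filter_congr
    intro p hp
    have hg : PySem.Dict.get? (PySem.Dict.mk col) p.1 = some p.2 :=
      PySem.Dict.get?_of_mem_items _ (by exact hp) h
    simp [Function.comp, hg]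
  rw [hcongr]
  exact PySem.Set.ofList_eq_self_of_nodup _
    (h.sublist (List.Sublist.map Prod.fst List.filter_sublist))

-- ===== VERDICT (by name: the statement is the Claim_ definition above) =====
theorem dist_colours_spec : Claim_equal_dist_colours := by
  intro col _ hpre
  unfold Spec_dist_colours
  rw [pv_A col hpre, pv_B col hpre, pv_core col hpre]
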